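-- pv_equiv track=rewrite | github.com/yibozhou0505/Python-course-homework | modelisation/3.5/ex11.py | calcul
-- ===== SOURCE A (Python) =====
-- def somme(n:int)->int:
--     sum = 0
--     for i in range(1,n+1):
--         sum += i
--     return sum  # e.g., n=3 sum = 1+2+3 = 6
--
-- def calcul(x)->int:
--     if x < 0:
--         raise ValueError("n must be a positive integer.")
--     k =0
--     while True:
--         if somme(k) < x:
--             k += 1
--         else:
--             k -= 1
--             break
--     return k #
-- ===== SOURCE B (Python) =====
-- def calcul(x) -> int:
--     # Closed search: find the least k with k*(k+1)//2 >= x by exponential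
--     # growth + binary search, then return k - 1, exactly as A does.
--     if x < 0:
--         raise ValueError("n must be a positive integer.")
--     hi = 1
--     while hi * (hi + 1) // 2 < x:
--         hi *= 2
--     lo = 0
--     while lo < hi:
--         mid = (lo + hi) // 2
--         if mid * (mid + 1) // 2 < x:
--             lo = mid + 1
--         else:
--             hi = mid
--     return lo - 1
-- ===== Notes on version B (the rewrite author's own statement) =====
-- stated objective: faster
-- what changed: A linearly increments k recomputing the triangular sum from scratch each step (quadratic); B finds the least k with k(k+1)/2 >= x by exponential doubling plus binary search using the closed-form triangular number.
import Mathlib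
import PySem

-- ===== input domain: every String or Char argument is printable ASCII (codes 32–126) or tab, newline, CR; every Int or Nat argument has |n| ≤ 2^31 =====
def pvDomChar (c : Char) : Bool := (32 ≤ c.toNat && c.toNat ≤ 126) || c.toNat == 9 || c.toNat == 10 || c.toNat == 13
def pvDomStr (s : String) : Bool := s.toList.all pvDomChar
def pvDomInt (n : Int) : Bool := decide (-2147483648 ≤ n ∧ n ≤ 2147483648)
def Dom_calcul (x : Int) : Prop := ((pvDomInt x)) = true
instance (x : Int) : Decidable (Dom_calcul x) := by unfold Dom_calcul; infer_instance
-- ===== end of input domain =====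

-- B replaces A's linear scan (recomputing the triangular sum each step) by
-- exponential doubling + binary search on the closed-form triangular number.

-- ===== PORT A =====

-- somme(n): sum += i for i in range(1, n+1)
def somme (n : Int) : Int :=
  (PySem.List.pyRange 1 (n + 1) 1).foldl (fun s i => s + i) 0

theorem somme_nonpos {n : Int} (h : n ≤ 0) : somme n = 0 := by
  unfold somme
  rw [PySem.List.pyRange_one_eq_nil (by omega)]
  rfl

theorem somme_succ {n : Int} (h : 0 ≤ n) : somme (n + 1) = somme n + (n + 1) := by
  unfold somme
  rw [show n + 1 + 1 = (n + 1) + 1 by ring,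
      PySem.List.pyRange_one_succ_right (by omega), List.foldl_append]
  rfl

-- A's 'while True' loop: k += 1 while somme(k) < x, else return k - 1
def calculLoop (x k : Int) : Int :=
  if somme k < x then calculLoop x (k + 1) else k - 1
termination_by ((x - somme k).toNat + (1 - k).toNat)
decreasing_by
  rename_i hlt
  by_cases hk : 0 ≤ k
  · have h1 := somme_succ hk
    omega
  · have h1 : somme k = 0 := somme_nonpos (by omega)
    have h2 : somme (k + 1) = 0 := somme_nonpos (by omega)
    omega

def calcul (x : Int) : Int :=
  if x < 0 then 0  -- raise ValueError: excluded by Pre_calcul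
  else calculLoop x 0

-- ===== PORT B =====

-- closed-form facts about the triangular sum, used by B's termination measures
theorem somme_double {n : Int} (h : 0 ≤ n) : 2 * somme n = n * (n + 1) := by
  obtain ⟨m, rfl⟩ := Int.eq_ofNat_of_zero_le h
  induction m with
  | zero => simp [somme_nonpos]
  | succ p ih =>
      have hs := somme_succ (n := (p : Int)) (by positivity)
      push_cast at *
      linear_combination 2 * hs + ih (by positivity)

theorem somme_mono {a b : Int} (ha : 0 ≤ a) (hab : a ≤ b) : somme a ≤ somme b := by
  have h1 := somme_double ha
  have h2 := somme_double (show (0:Int) ≤ b by omega)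
  nlinarith

-- hi*(hi+1)//2 as written in Source B
theorem triB_eq {h : Int} (hh : 0 ≤ h) :
    PySem.Int.floordiv (h * (h + 1)) 2 = somme h := by
  rw [PySem.Int.floordiv_eq_ediv_of_pos (by omega), ← somme_double hh,
      Int.mul_ediv_cancel_left _ (by omega)]

-- first loop of B: hi *= 2 while hi*(hi+1)//2 < x  (the 'h < 1' guard only
-- makes the recursion total; Source B always enters with hi = 1 ≥ 1)
def growHi (x h : Int) : Int :=
  if h < 1 then h
  else if PySem.Int.floordiv (h * (h + 1)) 2 < x then growHi x (2 * h)
  else h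
termination_by (x - somme h).toNat
decreasing_by
  rename_i hge hlt
  rw [triB_eq (by omega)] at hlt
  have h1 : somme (h + 1) ≤ somme (2 * h) := somme_mono (by omega) (by omega)
  have h2 := somme_succ (n := h) (by omega)
  omega

-- second loop of B: binary search for the least k with k*(k+1)//2 ≥ x
def bsLoop (x lo hi : Int) : Int :=
  if hlt : lo < hi then
    let mid := PySem.Int.floordiv (lo + hi) 2
    if PySem.Int.floordiv (mid * (mid + 1)) 2 < x then bsLoop x (mid + 1) hi
    else bsLoop x lo mid
  else lo
termination_by (hi - lo).toNat
decreasing_by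
  · have := PySem.Int.floordiv_two_mid_bounds (lo := lo) (hi := hi) (by omega)
    omega
  · have _hb := PySem.Int.floordiv_two_mid_bounds (lo := lo) (hi := hi) (by omega)
    have hlt2 : PySem.Int.floordiv (lo + hi) 2 < hi := by
      rw [PySem.Int.floordiv_lt_iff_lt_mul (by omega)]; omega
    omega

def calcul_alt (x : Int) : Int :=
  if x < 0 then 0  -- raise ValueError: excluded by Pre_calcul
  else bsLoop x 0 (growHi x 1) - 1

-- ===== PRECONDITION & SPEC =====
-- A raises ValueError exactly when x < 0; those inputs are excluded.
def Pre_calcul (x : Int) : Prop := 0 ≤ x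
instance (x : Int) : Decidable (Pre_calcul x) := by unfold Pre_calcul; infer_instance

def pvWitness_calcul : Int := 7

def Spec_calcul (x : Int) (out : Int) : Prop := out = calcul_alt x
instance (x : Int) (out : Int) : Decidable (Spec_calcul x out) := by unfold Spec_calcul; infer_instance

-- ===== CLAIM (what is proved, stated in full; the proofs are below) =====
def Claim_equal_calcul : Prop := ∀ (x : Int), Dom_calcul x → Pre_calcul x → Spec_calcul x (calcul x)

-- ===== LEMMAS AND PROOFS =====

theorem somme_nonneg {n : Int} : 0 ≤ somme n := by
  by_cases h : 0 ≤ n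
  · have := somme_double h
    nlinarith
  · rw [somme_nonpos (by omega)]

-- The least Nat n with x ≤ somme n (both programs compute this minus 1).
theorem exists_somme_ge (x : Int) : ∃ n : Nat, x ≤ somme (n : Int) := by
  refine ⟨x.toNat, ?_⟩
  by_cases h : 1 ≤ x
  · have hd := somme_double (n := (x.toNat : Int)) (by positivity)
    have ht : ((x.toNat : Nat) : Int) = x := Int.toNat_of_nonneg (by omega)
    nlinarith [mul_nonneg (show (0:Int) ≤ x by omega) (show (0:Int) ≤ x - 1 by omega)]
  · exact le_trans (by omega) somme_nonneg

def Nx (x : Int) : Nat := Nat.find (exists_somme_ge x)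

theorem Nx_spec (x : Int) : x ≤ somme (Nx x) := Nat.find_spec (exists_somme_ge x)

theorem Nx_min {x : Int} {m : Nat} (h : m < Nx x) : somme (m : Int) < x := by
  have := Nat.find_min (exists_somme_ge x) h
  omega

-- the pivotal bracket: for k ≥ 0, somme k < x ↔ k < Nx x
theorem lt_Nx_iff {x k : Int} (hk : 0 ≤ k) : somme k < x ↔ k < (Nx x : Int) := by
  constructor
  · intro hlt
    by_contra hge
    have h1 := somme_mono (a := ((Nx x : Nat) : Int)) (b := k) (by positivity) (by omega)
    have h2 := Nx_spec x
    omega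
  · intro hlt
    have hke : ((k.toNat : Nat) : Int) = k := Int.toNat_of_nonneg hk
    have hm : k.toNat < Nx x := by omega
    have h1 := Nx_min (x := x) hm
    rw [hke] at h1
    omega

theorem calculLoop_eq {x k : Int} (hk : 0 ≤ k) (hle : k ≤ (Nx x : Int)) :
    calculLoop x k = (Nx x : Int) - 1 := by
  generalize hn : ((Nx x : Int) - k).toNat = n at *
  induction n using Nat.strong_induction_on generalizing k with
  | _ n ih =>
      rw [calculLoop]
      by_cases hklt : k < (Nx x : Int)
      · have hs : somme k < x := (lt_Nx_iff hk).mpr hklt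
        rw [if_pos hs]
        exact ih ((Nx x : Int) - (k + 1)).toNat (by omega) (by omega) (by omega) rfl
      · have hs : ¬ somme k < x := by rw [lt_Nx_iff hk]; omega
        rw [if_neg hs]
        omega

theorem growHi_eq {x h : Int} (hh : 1 ≤ h) : (Nx x : Int) ≤ growHi x h ∧ 1 ≤ growHi x h := by
  generalize hn : (x - somme h).toNat = n at *
  induction n using Nat.strong_induction_on generalizing h with
  | _ n ih =>
      rw [growHi]
      have hng : ¬ h < 1 := by omega
      simp only [hng, if_false]
      by_cases hlt : PySem.Int.floordiv (h * (h + 1)) 2 < x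
      · simp only [hlt, if_true]
        have hlt' : somme h < x := by rwa [triB_eq (by omega)] at hlt
        have h1 : somme (h + 1) ≤ somme (2 * h) := somme_mono (by omega) (by omega)
        have h2 := somme_succ (n := h) (by omega)
        exact ih (x - somme (2 * h)).toNat (by omega) (by omega) rfl
      · simp only [hlt, if_false]
        rw [triB_eq (by omega)] at hlt
        have : ¬ h < (Nx x : Int) := by rw [← lt_Nx_iff (by omega)]; omega
        omega

theorem bsLoop_eq {x lo hi : Int} (hlo : 0 ≤ lo) (hle : lo ≤ (Nx x : Int))
    (hhi : (Nx x : Int) ≤ hi) : bsLoop x lo hi = (Nx x : Int) := by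
  generalize hn : (hi - lo).toNat = n at *
  induction n using Nat.strong_induction_on generalizing lo hi with
  | _ n ih =>
      rw [bsLoop]
      by_cases hlt : lo < hi
      · simp only [hlt, dif_pos]
        have hb := PySem.Int.floordiv_two_mid_bounds (lo := lo) (hi := hi) (by omega)
        have hmidlt : PySem.Int.floordiv (lo + hi) 2 < hi := by
          rw [PySem.Int.floordiv_lt_iff_lt_mul (by omega)]; omega
        set mid := PySem.Int.floordiv (lo + hi) 2 with hmid
        by_cases hc : PySem.Int.floordiv (mid * (mid + 1)) 2 < x
        · simp only [hc, if_true]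
          have : somme mid < x := by rwa [triB_eq (by omega)] at hc
          have hmn : mid < (Nx x : Int) := (lt_Nx_iff (by omega)).mp this
          exact ih (hi - (mid + 1)).toNat (by omega) (by omega) (by omega) hhi rfl
        · simp only [hc, if_false]
          rw [triB_eq (by omega)] at hc
          have : ¬ mid < (Nx x : Int) := by rw [← lt_Nx_iff (by omega)]; omega
          exact ih (mid - lo).toNat (by omega) hlo (by omega) (by omega) rfl
      · simp only [hlt, dif_neg, not_false_iff]
        omega

-- ===== VERDICT (by name: the statement is the Claim_ definition above) =====
theorem calcul_spec : Claim_equal_calcul := by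
  intro x _ hpre
  unfold Spec_calcul calcul calcul_alt
  have hx : ¬ x < 0 := by exact not_lt.mpr hpre
  simp only [hx, if_false]
  have hg := growHi_eq (x := x) (h := 1) le_rfl
  rw [calculLoop_eq le_rfl (by positivity), bsLoop_eq le_rfl (by positivity) hg.1]
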